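-- pv_equiv track=rewrite | github.com/ELIFE-ASU/Patents | assembly_calcs.py | build_month_increments
-- ===== SOURCE A (Python) =====
-- def build_month_increments(start, stop):
--     """ Build month increments in the form YYYY-MM
--
--     Args:
--         start (int): Starting year
--         stop (int): Ending year
--
--     Returns:
--         list: list of strings in the form YYYY-MM (e.g., "1980-01")
--     """
--     months = []
--     while start <= stop:
--         for month in [
--                 "01", "02", "03", "04", "05", "06", "07", "08", "09", "10",
--                 "11", "12"
--         ]:
--             months.append(str(start) + "-" + month)
--         start += 1
--
--     return months
-- ===== SOURCE B (Python) =====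
-- def build_month_increments(start, stop):
--     """Flat single pass: derive year/month of each index by divmod instead of nested loops."""
--     n = max(0, (stop - start + 1) * 12)
--     return [f"{start + i // 12}-{i % 12 + 1:02d}" for i in range(n)]
-- ===== Notes on version B (the rewrite author's own statement) =====
-- stated objective: simpler
-- what changed: Replaces the nested while-over-years / for-over-literal-month-strings loop with a single comprehension over a computed month count, deriving each year and zero-padded month from the flat index by divmod.
import Mathlib
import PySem

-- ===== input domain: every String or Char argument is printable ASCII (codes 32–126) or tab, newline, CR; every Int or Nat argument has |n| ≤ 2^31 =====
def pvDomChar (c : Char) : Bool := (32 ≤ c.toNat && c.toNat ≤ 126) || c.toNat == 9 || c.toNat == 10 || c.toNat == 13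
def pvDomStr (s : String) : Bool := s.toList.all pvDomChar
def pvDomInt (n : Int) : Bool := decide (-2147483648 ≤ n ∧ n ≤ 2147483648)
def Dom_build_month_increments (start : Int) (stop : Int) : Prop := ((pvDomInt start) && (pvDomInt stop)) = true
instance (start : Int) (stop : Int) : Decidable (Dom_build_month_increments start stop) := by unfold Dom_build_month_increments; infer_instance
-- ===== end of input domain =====

-- B replaces A's nested year/month loop by one flat pass over month indices with divmod (objective: simpler).

-- ===== PORT A =====
-- the literal month list of A's inner for loop
def monthLits : List String :=
  ["01", "02", "03", "04", "05", "06", "07", "08", "09", "10", "11", "12"]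

-- the while loop; fuel = (stop - start + 1).toNat, the exact number of iterations
def buildLoopA : Nat → Int → List String → List String
  | 0, _, months => months
  | k + 1, start, months =>
      buildLoopA k (start + 1)
        (monthLits.foldl (fun acc m => acc ++ [PySem.Int.toStr start ++ "-" ++ m]) months)

def build_month_increments (start : Int) (stop : Int) : List String :=
  buildLoopA (stop - start + 1).toNat start []

-- ===== PORT B =====
-- f"{m:02d}"; exact for 0 ≤ m ≤ 99 (here m ∈ 1..12)
def pad2 (m : Int) : String :=
  if m < 10 then "0" ++ PySem.Int.toStr m else PySem.Int.toStr m

def build_month_increments_alt (start : Int) (stop : Int) : List String :=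
  (PySem.List.pyRange 0 (max 0 ((stop - start + 1) * 12)) 1).map (fun i =>
    PySem.Int.toStr (start + PySem.Int.floordiv i 12) ++ "-" ++ pad2 (PySem.Int.mod i 12 + 1))

-- ===== PRECONDITION & SPEC =====
def Spec_build_month_increments (start : Int) (stop : Int) (out : List String) : Prop := out = build_month_increments_alt start stop
instance (start : Int) (stop : Int) (out : List String) : Decidable (Spec_build_month_increments start stop out) := by unfold Spec_build_month_increments; infer_instance

-- ===== CLAIM (what is proved, stated in full; the proofs are below) =====
def Claim_equal_build_month_increments : Prop := ∀ (start : Int) (stop : Int), Dom_build_month_increments start stop → Spec_build_month_increments start stop (build_month_increments start stop)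

-- ===== LEMMAS AND PROOFS =====

-- one year's block of strings
def yearBlock (y : Int) : List String := monthLits.map (fun m => PySem.Int.toStr y ++ "-" ++ m)

-- B's element function, at a Nat index
def hN (start : Int) (n : Nat) : String :=
  PySem.Int.toStr (start + PySem.Int.floordiv (n : Int) 12) ++ "-" ++ pad2 (PySem.Int.mod (n : Int) 12 + 1)

lemma foldl_monthLits (f : String → String) (months : List String) :
    monthLits.foldl (fun acc m => acc ++ [f m]) months = months ++ monthLits.map f := by
  simp [monthLits, List.foldl, List.map]

lemma buildLoopA_acc (k : Nat) : ∀ (start : Int) (months : List String),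
    buildLoopA k start months = months ++ buildLoopA k start [] := by
  induction k with
  | zero => intro start months; simp [buildLoopA]
  | succ k ih =>
      intro start months
      simp only [buildLoopA, foldl_monthLits]
      rw [ih (start + 1), ih (start + 1) (([] : List String) ++ _)]
      simp

lemma hN_shift (start : Int) (n : Nat) :
    hN start (12 + n) = hN (start + 1) n := by
  have h1 := PySem.Int.floordiv_natCast (12 + n) 12
  have h3 := PySem.Int.floordiv_natCast n 12
  have h2 := PySem.Int.mod_natCast (12 + n) 12
  have h4 := PySem.Int.mod_natCast n 12
  simp only [Nat.cast_ofNat] at h1 h2 h3 h4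
  unfold hN
  rw [h1, h2, h3, h4, Nat.add_div_left n (by norm_num : 0 < 12), Nat.add_mod_left]
  have h5 : start + ((n / 12 + 1 : Nat) : Int) = start + 1 + ((n / 12 : Nat) : Int) := by
    push_cast; ring
  rw [h5]

lemma hN_small (start : Int) (r : Nat) (h : r < 12) :
    hN start r = PySem.Int.toStr start ++ "-" ++ monthLits.getD r "" := by
  have h1 := PySem.Int.floordiv_natCast r 12
  have h2 := PySem.Int.mod_natCast r 12
  simp only [Nat.cast_ofNat] at h1 h2
  unfold hN
  rw [h1, h2, Nat.div_eq_of_lt h, Nat.mod_eq_of_lt h]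
  have h3 : start + ((0 : Nat) : Int) = start := by simp
  rw [h3]
  have h4 : pad2 ((r : Int) + 1) = monthLits.getD r "" := by
    interval_cases r <;> decide
  rw [h4]

lemma map_hN_range12 (start : Int) :
    (List.range 12).map (hN start) = yearBlock start := by
  simp only [show List.range 12 = [0,1,2,3,4,5,6,7,8,9,10,11] from rfl, List.map]
  repeat rw [hN_small _ _ (by norm_num)]
  simp [yearBlock, monthLits]

-- B over 12*k indices, as a function of the year count
lemma B_block (k : Nat) : ∀ (start : Int),
    (List.range (12 * (k + 1))).map (hN start) =
      yearBlock start ++ (List.range (12 * k)).map (hN (start + 1)) := by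
  intro start
  have h : 12 * (k + 1) = 12 + 12 * k := by ring
  rw [h, List.range_add, List.map_append, List.map_map, map_hN_range12]
  congr 1
  apply List.map_congr_left
  intro n _
  exact hN_shift start n

lemma loopA_eq_B (k : Nat) : ∀ (start : Int),
    buildLoopA k start [] = (List.range (12 * k)).map (hN start) := by
  induction k with
  | zero => intro start; simp [buildLoopA]
  | succ k ih =>
      intro start
      rw [B_block k start, ← ih (start + 1)]
      simp only [buildLoopA, foldl_monthLits, List.nil_append]
      rw [buildLoopA_acc k (start + 1) (monthLits.map _)]
      rfl

lemma alt_eq (start stop : Int) :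
    build_month_increments_alt start stop =
      (List.range (12 * (stop - start + 1).toNat)).map (hN start) := by
  unfold build_month_increments_alt
  have hn : max 0 ((stop - start + 1) * 12) = ((12 * (stop - start + 1).toNat : Nat) : Int) := by
    by_cases h : stop - start + 1 ≤ 0
    · rw [Int.toNat_of_nonpos h]
      simp
      nlinarith
    · have h := lt_of_not_ge h
      have h0 : (0:Int) ≤ stop - start + 1 := h.le
      have h2 : (0:Int) ≤ (stop - start + 1) * 12 := by positivity
      rw [max_eq_right h2]
      push_cast [Int.toNat_of_nonneg h0]
      ring
  rw [hn, PySem.List.pyRange_zero_natCast, List.map_map]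
  rfl

-- ===== VERDICT (by name: the statement is the Claim_ definition above) =====
theorem build_month_increments_spec : Claim_equal_build_month_increments := by
  intro start stop _
  show build_month_increments start stop = build_month_increments_alt start stop
  rw [alt_eq, build_month_increments, loopA_eq_B]
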